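-- pv_equiv track=rewrite | github.com/ianm24/Minecraft-Command-to-Structure | src/MCStoNBT.py | getStructureSize
-- ===== SOURCE A (Python) =====
-- def getStructureSize(usedCoordList):
-- 	maxX = 1
-- 	maxY = 1
-- 	maxZ = 1
-- 	for coordinate in usedCoordList:
-- 		if coordinate[0] >= maxX:
-- 			maxX = coordinate[0] + 1
-- 		if coordinate[1] >= maxY:
-- 			maxY = coordinate[1] + 1
-- 		if coordinate[2] >= maxZ:
-- 			maxZ = coordinate[2] + 1
-- 	return [maxX,maxY,maxZ]
-- ===== SOURCE B (Python) =====
-- def _maxTriple(coords):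
--     # componentwise maximum of a NONEMPTY list of coordinate triples,
--     # by divide and conquer on halves
--     n = len(coords)
--     if n == 1:
--         return coords[0]
--     mid = n // 2
--     ax, ay, az = _maxTriple(coords[:mid])
--     bx, by, bz = _maxTriple(coords[mid:])
--     return (max(ax, bx), max(ay, by), max(az, bz))
--
-- def getStructureSize(usedCoordList):
--     if not usedCoordList:
--         return [1, 1, 1]
--     mx, my, mz = _maxTriple(usedCoordList)
--     return [max(mx + 1, 1), max(my + 1, 1), max(mz + 1, 1)]
-- ===== Notes on version B (the rewrite author's own statement) =====
-- stated objective: alternative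
-- what changed: Replaces A's fused single pass with three conditionally-updated '+1' counters by a divide-and-conquer reduction that recursively computes the raw componentwise maximum triple over halves of the list, and applies the '+1, floor at 1' transform once at the very end.
import Mathlib
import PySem

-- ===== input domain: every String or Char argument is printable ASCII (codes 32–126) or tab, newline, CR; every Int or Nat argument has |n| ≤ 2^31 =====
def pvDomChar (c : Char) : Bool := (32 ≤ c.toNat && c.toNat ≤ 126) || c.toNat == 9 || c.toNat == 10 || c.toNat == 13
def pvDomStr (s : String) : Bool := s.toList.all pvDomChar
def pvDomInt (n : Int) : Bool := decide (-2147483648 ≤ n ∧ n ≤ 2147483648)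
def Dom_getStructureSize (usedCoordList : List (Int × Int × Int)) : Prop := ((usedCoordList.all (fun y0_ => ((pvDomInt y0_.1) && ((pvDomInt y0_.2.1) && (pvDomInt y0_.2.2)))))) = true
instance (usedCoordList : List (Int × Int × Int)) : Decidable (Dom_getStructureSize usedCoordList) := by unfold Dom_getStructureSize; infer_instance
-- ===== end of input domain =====

-- B replaces A's fused conditional-counter scan by a divide-and-conquer componentwise-max
-- reduction followed by one final '+1, floor at 1' transform (objective: alternative).

-- ===== PORT A =====
-- single loop, three running counters, conditional updates, as in Source A
def getStructureSize (usedCoordList : List (Int × Int × Int)) : List Int :=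
  let s := usedCoordList.foldl
    (fun (s : Int × Int × Int) coordinate =>
      let mX := if coordinate.1 ≥ s.1 then coordinate.1 + 1 else s.1
      let mY := if coordinate.2.1 ≥ s.2.1 then coordinate.2.1 + 1 else s.2.1
      let mZ := if coordinate.2.2 ≥ s.2.2 then coordinate.2.2 + 1 else s.2.2
      (mX, mY, mZ))
    (1, 1, 1)
  [s.1, s.2.1, s.2.2]

-- ===== PORT B =====
-- _maxTriple: divide and conquer on halves; called only on nonempty lists,
-- so `coords[0]` in the n == 1 case is ported as headD with an unreachable default.
def pvMaxTriple (coords : List (Int × Int × Int)) : Int × Int × Int :=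
  if h : coords.length ≤ 1 then coords.headD (0, 0, 0)
  else
    let mid := coords.length / 2
    let a := pvMaxTriple (coords.take mid)
    let b := pvMaxTriple (coords.drop mid)
    (max a.1 b.1, max a.2.1 b.2.1, max a.2.2 b.2.2)
termination_by coords.length
decreasing_by
  · simp only [List.length_take]; omega
  · simp only [List.length_drop]; omega

def getStructureSize_alt (usedCoordList : List (Int × Int × Int)) : List Int :=
  if usedCoordList = [] then [1, 1, 1]
  else
    let m := pvMaxTriple usedCoordList
    [max (m.1 + 1) 1, max (m.2.1 + 1) 1, max (m.2.2 + 1) 1]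

-- ===== PRECONDITION & SPEC =====
def Spec_getStructureSize (usedCoordList : List (Int × Int × Int)) (out : List Int) : Prop := out = getStructureSize_alt usedCoordList
instance (usedCoordList : List (Int × Int × Int)) (out : List Int) : Decidable (Spec_getStructureSize usedCoordList out) := by unfold Spec_getStructureSize; infer_instance

-- ===== CLAIM (what is proved, stated in full; the proofs are below) =====
def Claim_equal_getStructureSize : Prop := ∀ (usedCoordList : List (Int × Int × Int)), Dom_getStructureSize usedCoordList → Spec_getStructureSize usedCoordList (getStructureSize usedCoordList)

-- ===== LEMMAS AND PROOFS =====

-- A's conditional update of one counter is exactly `max` against the shifted coordinate.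
theorem pv_step_eq_max (m c : Int) : (if c ≥ m then c + 1 else m) = max m (c + 1) := by
  split <;> omega

-- A's fused fold equals three independent max-folds over the shifted components.
theorem pv_fold_split (l : List (Int × Int × Int)) (a b c : Int) :
    l.foldl
      (fun (s : Int × Int × Int) coordinate =>
        let mX := if coordinate.1 ≥ s.1 then coordinate.1 + 1 else s.1
        let mY := if coordinate.2.1 ≥ s.2.1 then coordinate.2.1 + 1 else s.2.1
        let mZ := if coordinate.2.2 ≥ s.2.2 then coordinate.2.2 + 1 else s.2.2
        (mX, mY, mZ))
      (a, b, c)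
    = ((l.map (fun t => t.1 + 1)).foldl max a,
       (l.map (fun t => t.2.1 + 1)).foldl max b,
       (l.map (fun t => t.2.2 + 1)).foldl max c) := by
  induction l generalizing a b c with
  | nil => rfl
  | cons hd tl ih =>
    simp only [List.foldl_cons, List.map_cons]
    rw [pv_step_eq_max, pv_step_eq_max, pv_step_eq_max, ih]

-- For a nonempty list, the max-fold of a shifted component over any seed is the seed
-- maxed with the corresponding component of pvMaxTriple, shifted.
theorem pv_maxTriple_fold : ∀ (n : ℕ) (l : List (Int × Int × Int)), l.length = n → l ≠ [] →
    ∀ s : Int,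
      ((l.map (fun t => t.1 + 1)).foldl max s = max s ((pvMaxTriple l).1 + 1)) ∧
      ((l.map (fun t => t.2.1 + 1)).foldl max s = max s ((pvMaxTriple l).2.1 + 1)) ∧
      ((l.map (fun t => t.2.2 + 1)).foldl max s = max s ((pvMaxTriple l).2.2 + 1)) := by
  intro n
  induction n using Nat.strong_induction_on with
  | _ n ih =>
    intro l hlen hne s
    by_cases h1 : l.length ≤ 1
    · match l, h1 with
      | [], _ => exact absurd rfl hne
      | [x], _ =>
        simp [pvMaxTriple]
    · rw [pvMaxTriple]
      simp only [h1, dif_neg, not_false_iff]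
      have hmid1 : 1 ≤ l.length / 2 := by omega
      have hmid2 : l.length / 2 < l.length := by omega
      have htne : l.take (l.length / 2) ≠ [] := by
        intro h; have := congrArg List.length h
        simp only [List.length_take, List.length_nil] at this; omega
      have hdne : l.drop (l.length / 2) ≠ [] := by
        intro h; have := congrArg List.length h
        simp only [List.length_drop, List.length_nil] at this; omega
      have ht := ih (l.take (l.length / 2)).length
        (by simp only [List.length_take]; omega)
        (l.take (l.length / 2)) rfl htne
      have hd := ih (l.drop (l.length / 2)).length
        (by simp only [List.length_drop]; omega)
        (l.drop (l.length / 2)) rfl hdne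
      have hsplit : l = l.take (l.length / 2) ++ l.drop (l.length / 2) :=
        (List.take_append_drop _ _).symm
      refine ⟨?_, ?_, ?_⟩ <;>
      · conv_lhs => rw [hsplit]
        simp only [List.map_append, List.foldl_append]
        first
          | rw [(ht s).1, (hd _).1]
          | rw [(ht s).2.1, (hd _).2.1]
          | rw [(ht s).2.2, (hd _).2.2]
        simp only [max_assoc, max_add_add_right]

-- ===== VERDICT (by name: the statement is the Claim_ definition above) =====
theorem getStructureSize_spec : Claim_equal_getStructureSize := by
  intro l _
  show getStructureSize l = getStructureSize_alt l
  unfold getStructureSize getStructureSize_alt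
  rw [pv_fold_split]
  by_cases hne : l = []
  · subst hne; rfl
  · simp only [hne, if_neg, not_false_iff]
    have h := pv_maxTriple_fold l.length l rfl hne 1
    rw [h.1, h.2.1, h.2.2]
    simp [max_comm]
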